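-- pv_equiv track=rewrite | github.com/a-bisol/SOFE48480_Group11 | steganographImage/__init__.py | modify_pix
-- ===== SOURCE A (Python) =====
-- def enc_string(data):
--     new_data = []
--     for i in data:
--         new_data.append(format(ord(i), '08b'))
--     return new_data
--
-- def modify_pix(pixels, data):
--     enc_string_list = enc_string(data)
--     str_len = len(enc_string_list)
--     image_data = iter(pixels)
--
--     for i in range(str_len):
--         pix = [value for value in image_data.__next__()[:3]
--                + image_data.__next__()[:3] + image_data.__next__()[:3]]
--
--         for j in range(0, 8):
--             if enc_string_list[i][j] == '0' and pix[j] % 2 != 0: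
--                 pix[j] -= 1
--             elif enc_string_list[i][j] == '1' and pix[j] % 2 == 0:
--                 if pix[j] != 0:
--                     pix[j] -= 1
--                 else:
--                     pix[j] += 1
--
--         if i == str_len - 1:
--             if pix[-1] % 2 == 0:
--                 if pix[-1] != 0:
--                     pix[-1] -= 1
--                 else:
--                     pix[-1] += 1
--         else:
--             if pix[-1] % 2 != 0:
--                 pix[-1] -= 1
--
--         pix = tuple(pix)
--         yield pix[0:3]
--         yield pix[3:6]
--         yield pix[6:9]
-- ===== SOURCE B (Python) =====
-- def modify_pix(pixels, data):
--     # Build one flat bit stream: 8 MSB-first bits per character plus a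
--     # terminator bit (1 only after the last character, else 0).
--     bits = []
--     for idx, c in enumerate(data):
--         o = ord(c)
--         for j in range(8):
--             bits.append((o >> (7 - j)) & 1)
--         bits.append(1 if idx == len(data) - 1 else 0)
--     it = iter(pixels)
--     pos = 0
--     while pos < len(bits):
--         vals = []
--         for _ in range(3):
--             vals.extend(it.__next__()[:3])
--         out = []
--         for v in vals:
--             b = bits[pos]
--             pos += 1
--             if v % 2 != b:
--                 v = v + 1 if v == 0 else v - 1
--             out.append(v)
--         yield tuple(out[0:3])
--         yield tuple(out[3:6])
--         yield tuple(out[6:9])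
-- ===== Notes on version B (the rewrite author's own statement) =====
-- stated objective: simpler
-- what changed: B replaces A's per-character list of 8-character binary strings and its three separate parity-fix branches (0-bit, 1-bit, terminator) by one flat integer bit stream (8 data bits plus a terminator bit per character) consumed with a single uniform parity-adjust rule per channel value.
import Mathlib
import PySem

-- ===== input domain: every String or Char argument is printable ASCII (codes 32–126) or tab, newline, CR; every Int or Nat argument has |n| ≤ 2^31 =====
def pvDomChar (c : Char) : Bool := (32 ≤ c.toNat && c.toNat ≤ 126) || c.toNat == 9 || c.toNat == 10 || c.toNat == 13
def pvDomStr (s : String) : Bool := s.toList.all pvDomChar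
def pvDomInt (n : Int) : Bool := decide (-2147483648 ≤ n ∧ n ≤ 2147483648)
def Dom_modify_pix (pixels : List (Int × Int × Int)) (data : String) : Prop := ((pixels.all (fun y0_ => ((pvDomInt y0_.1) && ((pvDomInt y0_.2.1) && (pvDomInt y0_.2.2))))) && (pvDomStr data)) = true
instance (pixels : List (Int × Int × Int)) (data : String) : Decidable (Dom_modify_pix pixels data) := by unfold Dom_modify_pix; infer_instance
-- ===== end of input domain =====

-- B replaces A's per-character 8-bit string table and three separate parity branches by one
-- flat bit stream (8 data bits + terminator bit per character) consumed by a single uniform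
-- parity-adjust rule (objective: simpler decomposition; the generator's return sequence only).

-- ===== PORT A =====
-- format(ord(i), '08b'): the 8-character binary representation, MSB first (exact for 0 ≤ n < 256)
def pvFormat08b (n : Nat) : List Char :=
  (List.range 8).map (fun j => if n.testBit (7 - j) then '1' else '0')

def enc_string (data : String) : List (List Char) :=
  data.toList.map (fun c => pvFormat08b c.toNat)

-- the body of one iteration of A's outer loop: pix built from three pixels, the j-loop over
-- the first 8 positions, then the pix[-1] terminator branch, then the three yielded slices
def pvStepA (s : List Char) (last : Bool) (p1 p2 p3 : Int × Int × Int) : List (Int × Int × Int) :=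
  let f : Nat → Int → Int := fun j v =>
    if s.getD j ' ' = '0' ∧ v % 2 ≠ 0 then v - 1
    else if s.getD j ' ' = '1' ∧ v % 2 = 0 then (if v ≠ 0 then v - 1 else v + 1)
    else v
  let a0 := f 0 p1.1;   let a1 := f 1 p1.2.1; let a2 := f 2 p1.2.2
  let a3 := f 3 p2.1;   let a4 := f 4 p2.2.1; let a5 := f 5 p2.2.2
  let a6 := f 6 p3.1;   let a7 := f 7 p3.2.1
  let w := p3.2.2
  let a8 := if last then (if w % 2 = 0 then (if w ≠ 0 then w - 1 else w + 1) else w)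
            else (if w % 2 ≠ 0 then w - 1 else w)
  [(a0, a1, a2), (a3, a4, a5), (a6, a7, a8)]

-- A's outer for-loop; i == str_len - 1 becomes "rest is empty"; pixel exhaustion (a Python
-- RuntimeError, excluded by Pre_) ends the output
def pvGoA : List (List Char) → List (Int × Int × Int) → List (Int × Int × Int)
  | [], _ => []
  | s :: rest, p1 :: p2 :: p3 :: pr => pvStepA s rest.isEmpty p1 p2 p3 ++ pvGoA rest pr
  | _ :: _, _ => []

def modify_pix (pixels : List (Int × Int × Int)) (data : String) : List (Int × Int × Int) :=
  pvGoA (enc_string data) pixels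

-- ===== PORT B =====
-- the flat bit stream: (ord(c) >> (7-j)) & 1 for j in range(8), then the terminator bit
def pvBits (data : String) : List Int :=
  (PySem.List.enumerate data.toList).flatMap (fun p =>
    (List.range 8).map (fun j => (((p.2.toNat >>> (7 - j)) &&& 1 : Nat) : Int))
      ++ [if p.1 = (data.toList.length : Int) - 1 then (1 : Int) else 0])

-- if v % 2 != b: v = v + 1 if v == 0 else v - 1
def pvAdj (b v : Int) : Int :=
  if v % 2 ≠ b then (if v = 0 then v + 1 else v - 1) else v

-- B's while loop: 9 bits and 3 pixels per round; pixel exhaustion (excluded by Pre_) ends it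
def pvGoB : List Int → List (Int × Int × Int) → List (Int × Int × Int)
  | b0 :: b1 :: b2 :: b3 :: b4 :: b5 :: b6 :: b7 :: b8 :: bs, p1 :: p2 :: p3 :: pr =>
      (pvAdj b0 p1.1, pvAdj b1 p1.2.1, pvAdj b2 p1.2.2)
        :: (pvAdj b3 p2.1, pvAdj b4 p2.2.1, pvAdj b5 p2.2.2)
        :: (pvAdj b6 p3.1, pvAdj b7 p3.2.1, pvAdj b8 p3.2.2)
        :: pvGoB bs pr
  | _, _ => []

def modify_pix_alt (pixels : List (Int × Int × Int)) (data : String) : List (Int × Int × Int) :=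
  pvGoB (pvBits data) pixels

-- ===== PRECONDITION & SPEC =====
-- Pre_ excludes inputs with fewer than 3 pixels per character, on which Python A raises
-- RuntimeError (StopIteration inside the generator, PEP 479).
def Pre_modify_pix (pixels : List (Int × Int × Int)) (data : String) : Prop :=
  3 * data.length ≤ pixels.length
instance (pixels : List (Int × Int × Int)) (data : String) : Decidable (Pre_modify_pix pixels data) := by unfold Pre_modify_pix; infer_instance

def pvWitness_modify_pix : (List (Int × Int × Int)) × String :=
  ([(10, 0, 7), (2, 3, 4), (255, 254, 1)], "A")

def Spec_modify_pix (pixels : List (Int × Int × Int)) (data : String) (out : List (Int × Int × Int)) : Prop := out = modify_pix_alt pixels data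
instance (pixels : List (Int × Int × Int)) (data : String) (out : List (Int × Int × Int)) : Decidable (Spec_modify_pix pixels data out) := by unfold Spec_modify_pix; infer_instance

-- ===== CLAIM (what is proved, stated in full; the proofs are below) =====
def Claim_equal_modify_pix : Prop := ∀ (pixels : List (Int × Int × Int)) (data : String), Dom_modify_pix pixels data → Pre_modify_pix pixels data → Spec_modify_pix pixels data (modify_pix pixels data)

-- ===== LEMMAS AND PROOFS =====

-- the uniform parity rule equals A's two-branch rule on the corresponding bit
theorem pvAdj_eq (m : Nat) (k : Nat) (v : Int) :
    (if (if m.testBit k then '1' else '0') = '0' ∧ v % 2 ≠ 0 then v - 1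
     else if (if m.testBit k then '1' else '0') = '1' ∧ v % 2 = 0 then (if v ≠ 0 then v - 1 else v + 1)
     else v)
    = pvAdj (((m >>> k) &&& 1 : Nat) : Int) v := by
  have hb : (m >>> k) &&& 1 = if m.testBit k then 1 else 0 := by
    rcases h : m.testBit k <;>
      · rw [Nat.testBit_eq_decide_div_mod_eq] at h
        rw [Nat.and_one_is_mod, Nat.shiftRight_eq_div_pow]
        simp at h ⊢ <;> omega
  rw [hb]
  cases h : m.testBit k <;> simp [pvAdj] <;> split_ifs <;> omega

theorem main_eq (l : List Char) : ∀ (s n : Int), s + l.length = n + 1 →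
    ∀ (pixels : List (Int × Int × Int)),
    pvGoA (l.map (fun c => pvFormat08b c.toNat)) pixels
      = pvGoB ((PySem.List.enumerate l s).flatMap (fun p =>
          (List.range 8).map (fun j => (((p.2.toNat >>> (7 - j)) &&& 1 : Nat) : Int))
            ++ [if p.1 = n then (1 : Int) else 0])) pixels := by
  induction l with
  | nil => intro s n h pixels; simp [PySem.List.enumerate_nil, pvGoA, pvGoB]
  | cons c rest ih =>
    intro s n h pixels
    rcases pixels with _ | ⟨p1, _ | ⟨p2, _ | ⟨p3, pr⟩⟩⟩ <;>
      simp only [PySem.List.enumerate_cons, List.flatMap_cons, List.map_cons,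
        List.range_succ, List.range_zero, List.nil_append,
        List.map, List.cons_append] <;>
      simp only [pvGoA, pvGoB]
    · -- enough pixels: one full round on both sides
      simp only [List.isEmpty_map, Nat.reduceSub]
      have hterm : (if s = n then (1 : Int) else 0) = (if rest.isEmpty then 1 else 0) := by
        rcases rest with _ | ⟨d, ds⟩
        · have : s = n := by simp at h; omega
          simp [this]
        · have : s ≠ n := by simp at h; omega
          simp [this]
      have hlast : pvStepA (pvFormat08b c.toNat) rest.isEmpty p1 p2 p3
          = [(pvAdj ((c.toNat >>> 7 &&& 1 : Nat) : Int) p1.1,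
              pvAdj ((c.toNat >>> 6 &&& 1 : Nat) : Int) p1.2.1,
              pvAdj ((c.toNat >>> 5 &&& 1 : Nat) : Int) p1.2.2),
             (pvAdj ((c.toNat >>> 4 &&& 1 : Nat) : Int) p2.1,
              pvAdj ((c.toNat >>> 3 &&& 1 : Nat) : Int) p2.2.1,
              pvAdj ((c.toNat >>> 2 &&& 1 : Nat) : Int) p2.2.2),
             (pvAdj ((c.toNat >>> 1 &&& 1 : Nat) : Int) p3.1,
              pvAdj ((c.toNat >>> 0 &&& 1 : Nat) : Int) p3.2.1,
              pvAdj (if rest.isEmpty then 1 else 0) p3.2.2)] := by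
        simp only [pvStepA, pvFormat08b, List.range_succ, List.range_zero, List.map_nil,
          List.map_cons, List.nil_append, List.cons_append, Nat.reduceSub,
          List.getD, List.getElem?_cons_zero, List.getElem?_cons_succ, Option.getD_some]
        rw [pvAdj_eq c.toNat 7, pvAdj_eq c.toNat 6, pvAdj_eq c.toNat 5, pvAdj_eq c.toNat 4,
          pvAdj_eq c.toNat 3, pvAdj_eq c.toNat 2, pvAdj_eq c.toNat 1, pvAdj_eq c.toNat 0]
        have : ∀ w : Int,
            (if rest.isEmpty then (if w % 2 = 0 then (if w ≠ 0 then w - 1 else w + 1) else w)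
             else (if w % 2 ≠ 0 then w - 1 else w))
            = pvAdj (if rest.isEmpty then 1 else 0) w := by
          intro w; cases rest.isEmpty <;> simp [pvAdj] <;> split_ifs <;> omega
        rw [this]
      rw [hlast, hterm]
      simp only [List.cons_append, List.nil_append]
      rw [ih (s + 1) n (by simp at h ⊢; omega) pr]
      simp only [List.range_succ, List.range_zero, List.map, List.nil_append,
        List.cons_append, Nat.reduceSub]

-- ===== VERDICT (by name: the statement is the Claim_ definition above) =====
theorem modify_pix_spec : Claim_equal_modify_pix := by
  intro pixels data _ _
  show modify_pix pixels data = modify_pix_alt pixels data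
  unfold modify_pix modify_pix_alt enc_string pvBits
  exact main_eq data.toList 0 ((data.toList.length : Int) - 1) (by omega) pixels
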